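-- pv_equiv track=rewrite | github.com/stankv/Studing | 25_TransformTransform.py | TransformTransform
-- ===== SOURCE A (Python) =====
-- def TransformTransform(A, N):
--
--     # трансформирующая трансформация
--     def S(A):
--         B = []
--         for i in range(len(A)):
--             for j in range(len(A) - i):
--                 k = i + j
--                 ma = max(A[j:k+1], default=-1)
--                 if ma > -1:    # чтобы не писать нули в массив
--                     B.append(ma)
--         return B
--
--     if sum(S(S(A))) % 2 == 0:
--         return True
--     else:
--         return False
-- ===== SOURCE B (Python) =====
-- def TransformTransform(A, N):
--     # Stage 1: maxima of all subarrays grouped by window length, via running-max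
--     # rows updated in place (O(n^2)); keep only maxima > -1 (same order as A's S).
--     n = len(A)
--     B = []
--     row = list(A)  # invariant: row[j] == max(A[j:j+i+1])
--     for i in range(n):
--         for m in row:
--             if m > -1:
--                 B.append(m)
--         row = [max(row[j], A[j + i + 1]) for j in range(n - i - 1)]
--     # Stage 2: only the parity of sum(S(B)) is needed; sum subarray maxima of B
--     # by start index with a running max instead of rebuilding the list.
--     total = 0
--     mlen = len(B)
--     for j in range(mlen):
--         cur = -1
--         for k in range(j, mlen):
--             if B[k] > cur:
--                 cur = B[k]
--             if cur > -1:
--                 total += cur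
--     return total % 2 == 0
-- ===== Notes on version B (the rewrite author's own statement) =====
-- stated objective: faster
-- what changed: Stage one builds the list of subarray maxima with running-max rows updated per window length instead of recomputing max over a fresh slice for every (i,j); stage two computes only the parity-relevant sum of subarray maxima of the intermediate list with a running max per start index instead of materialising the second list via slices.
import Mathlib
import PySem

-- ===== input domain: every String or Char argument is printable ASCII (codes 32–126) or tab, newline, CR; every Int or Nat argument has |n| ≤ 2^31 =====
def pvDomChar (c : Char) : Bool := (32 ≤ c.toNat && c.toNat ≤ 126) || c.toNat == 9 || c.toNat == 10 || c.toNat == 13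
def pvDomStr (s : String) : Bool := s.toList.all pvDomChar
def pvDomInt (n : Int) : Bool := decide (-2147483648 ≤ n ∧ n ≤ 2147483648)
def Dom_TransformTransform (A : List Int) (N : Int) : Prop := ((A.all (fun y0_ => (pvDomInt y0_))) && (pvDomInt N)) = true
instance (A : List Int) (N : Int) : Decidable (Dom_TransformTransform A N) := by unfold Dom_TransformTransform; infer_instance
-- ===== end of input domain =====

-- B replaces A's repeated slice-and-max scans by running-max rows (stage 1) and a
-- running-max parity sum (stage 2): an asymptotically faster exact re-implementation.

-- ===== PORT A =====
-- A's helper S: for i, for j: max of the slice A[j:k+1] (default -1), appended if > -1.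
def pyS (X : List Int) : List Int :=
  (PySem.List.pyRange 0 (X.length : Int) 1).foldl (fun B i =>
    (PySem.List.pyRange 0 ((X.length : Int) - i) 1).foldl (fun B j =>
      let k := i + j
      let ma := PySem.List.maxD (PySem.List.slice X (some j) (some (k + 1))) (fun y => y) (-1)
      if ma > -1 then B ++ [ma] else B) B) []

def TransformTransform (A : List Int) (N : Int) : Bool :=
  if PySem.Int.mod (pyS (pyS A)).sum 2 = 0 then true else false

-- ===== PORT B =====
-- stage 1 of Source B: running-max rows; state = (row, B)
def altStage1 (X : List Int) : List Int :=
  ((PySem.List.pyRange 0 (X.length : Int) 1).foldl (fun (s : List Int × List Int) i =>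
    let B2 := s.1.foldl (fun B m => if m > -1 then B ++ [m] else B) s.2
    let row2 := (PySem.List.pyRange 0 ((X.length : Int) - i - 1) 1).map
      (fun j => max (PySem.List.pyGetD s.1 j 0) (PySem.List.pyGetD X (j + i + 1) 0))
    (row2, B2)) (X, [])).2

-- stage 2 of Source B: running max per start index; inner state = (total, cur)
def altStage2 (B : List Int) : Int :=
  (PySem.List.pyRange 0 (B.length : Int) 1).foldl (fun total j =>
    ((PySem.List.pyRange j (B.length : Int) 1).foldl (fun (s : Int × Int) k =>
      let cur := if PySem.List.pyGetD B k 0 > s.2 then PySem.List.pyGetD B k 0 else s.2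
      (if cur > -1 then s.1 + cur else s.1, cur)) (total, -1)).1) 0

def TransformTransform_alt (A : List Int) (N : Int) : Bool :=
  decide (PySem.Int.mod (altStage2 (altStage1 A)) 2 = 0)

-- ===== PRECONDITION & SPEC =====
def Spec_TransformTransform (A : List Int) (N : Int) (out : Bool) : Prop := out = TransformTransform_alt A N
instance (A : List Int) (N : Int) (out : Bool) : Decidable (Spec_TransformTransform A N out) := by unfold Spec_TransformTransform; infer_instance

-- ===== CLAIM (what is proved, stated in full; the proofs are below) =====
def Claim_equal_TransformTransform : Prop := ∀ (A : List Int) (N : Int), Dom_TransformTransform A N → Spec_TransformTransform A N (TransformTransform A N)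

-- ===== LEMMAS AND PROOFS =====

def pvSub (X : List Int) (j i : Nat) : List Int := (X.drop j).take i
def pvWMax (X : List Int) (j i : Nat) : Int := PySem.List.maxD (pvSub X j i) (fun y => y) (-1)
def pvRows (X : List Int) (i : Nat) : List Int := (List.range (X.length - i)).map (fun j => pvWMax X j (i + 1))
def pvPos (x : Int) : Int := if x > -1 then x else 0

theorem pv_if_max (c x : Int) : (if x > c then x else c) = max c x := by
  by_cases h : x > c
  · simp [h, max_eq_right (le_of_lt h)]
  · simp [h, max_eq_left (not_lt.1 h)]

theorem pv_foldl_max_pull (a : Int) : ∀ (t : List Int) (c : Int),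
    List.foldl max (max a c) t = max a (List.foldl max c t) := by
  intro t
  induction t with
  | nil => intro c; rfl
  | cons x s ih => intro c; simp only [List.foldl_cons, max_assoc, ih]

theorem pv_pos_max_neg1 (y : Int) : pvPos (max (-1) y) = pvPos y := by
  by_cases h : y > -1
  · simp [pvPos, max_eq_right (le_of_lt h), h]
  · simp [pvPos, max_eq_left (not_lt.1 h), h]

theorem pv_pos_foldl (w : List Int) :
    pvPos (List.foldl max (-1) w) = pvPos (PySem.List.maxD w (fun y => y) (-1)) := by
  cases w with
  | nil => rfl
  | cons x t =>
    rw [PySem.List.maxD_id_cons]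
    show pvPos (List.foldl max (max (-1) x) t) = _
    rw [pv_foldl_max_pull, pv_pos_max_neg1]

theorem pv_sub_cons (X : List Int) (j i : Nat) (h : j < X.length) :
    pvSub X j (i + 1) = X.getD j 0 :: pvSub X (j + 1) i := by
  unfold pvSub
  rw [List.drop_eq_getElem_cons h, List.take_succ_cons, List.getD_eq_getElem X 0 h]

theorem pv_sub_snoc (X : List Int) (j i : Nat) (h : j + i < X.length) :
    pvSub X j (i + 1) = pvSub X j i ++ [X.getD (j + i) 0] := by
  unfold pvSub
  rw [List.take_add_one]
  congr 1
  rw [List.getElem?_drop]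
  rw [List.getElem?_eq_getElem h, List.getD_eq_getElem X 0 h]
  rfl

theorem pv_wmax_succ (X : List Int) (j i : Nat) (h : j + i < X.length) (hi : 1 ≤ i) :
    pvWMax X j (i + 1) = max (pvWMax X j i) (X.getD (j + i) 0) := by
  unfold pvWMax
  rw [pv_sub_snoc X j i h]
  obtain ⟨x, t, hxt⟩ : ∃ x t, pvSub X j i = x :: t := by
    have hlen : (pvSub X j i).length = i := by
      unfold pvSub
      rw [List.length_take, List.length_drop]
      omega
    cases hs : pvSub X j i with
    | nil => rw [hs] at hlen; simp at hlen; omega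
    | cons x t => exact ⟨x, t, rfl⟩
  rw [hxt]
  rw [List.cons_append, PySem.List.maxD_id_cons, PySem.List.maxD_id_cons, List.foldl_append]
  rfl

theorem pv_rows_zero (X : List Int) : pvRows X 0 = X := by
  apply List.ext_getElem
  · simp [pvRows]
  · intro n h1 h2
    simp only [pvRows] at h1 ⊢
    rw [List.getElem_map, List.getElem_range]
    show pvWMax X n 1 = _
    unfold pvWMax
    rw [pv_sub_cons X n 0 (by simpa using h2)]
    show PySem.List.maxD (X.getD n 0 :: pvSub X (n+1) 0) _ _ = _
    have : pvSub X (n+1) 0 = [] := by simp [pvSub]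
    rw [this, PySem.List.maxD_id_cons]
    simp [List.getD_eq_getElem?_getD, List.getElem?_eq_getElem h2]

-- chunk-style outer folds
theorem pv_foldl_chunks {α β : Type} (body : List β → α → List β) (g : α → List β) :
    ∀ (l : List α) (acc : List β), (∀ i ∈ l, ∀ B, body B i = B ++ g i) →
    l.foldl body acc = acc ++ (l.map g).flatten := by
  intro l
  induction l with
  | nil => intro acc _; simp
  | cons x s ih =>
    intro acc h
    simp only [List.foldl_cons, List.map_cons, List.flatten_cons]
    rw [h x (by simp), ih _ (fun i hi B => h i (by simp [hi]) B), List.append_assoc]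

theorem pv_foldl_add {α : Type} (body : Int → α → Int) (g : α → Int) :
    ∀ (l : List α) (t : Int), (∀ i ∈ l, ∀ s, body s i = s + g i) →
    l.foldl body t = t + (l.map g).sum := by
  intro l
  induction l with
  | nil => intro t _; simp
  | cons x s ih =>
    intro t h
    simp only [List.foldl_cons, List.map_cons, List.sum_cons]
    rw [h x (by simp), ih _ (fun i hi s => h i (by simp [hi]) s), add_assoc]

theorem pv_sum_filter (l : List Int) :
    (l.filter (fun m => decide (m > -1))).sum = (l.map pvPos).sum := by
  induction l with
  | nil => rfl
  | cons x s ih =>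
    by_cases h : x > -1
    · simp [h, pvPos, ih]
    · simp [h, pvPos, ih]

theorem pv_list_sum_range (f : Nat → Int) (n : Nat) :
    ((List.range n).map f).sum = ∑ i ∈ Finset.range n, f i := by
  induction n with
  | zero => rfl
  | succ m ih => rw [List.range_succ, List.map_append, List.sum_append, Finset.sum_range_succ, ih]; simp

theorem pv_sum_extend (f : Nat → Int) (k m : Nat) (h : k ≤ m) :
    ∑ i ∈ Finset.range k, f i = ∑ i ∈ Finset.range m, (if i < k then f i else 0) := by
  have e : ∑ i ∈ Finset.range k, (if i < k then f i else 0)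
      = ∑ i ∈ Finset.range m, (if i < k then f i else 0) := by
    apply Finset.sum_subset
    · intro x hx; simp [Finset.mem_range] at hx ⊢; omega
    · intro x _ hnx
      simp [Finset.mem_range] at hnx
      simp [Nat.not_lt.2 hnx]
  rw [← e]
  exact Finset.sum_congr rfl (fun i hi => by simp [Finset.mem_range.1 hi])

theorem pv_triangle (m : Nat) (h : Nat → Nat → Int) :
    ∑ j ∈ Finset.range m, ∑ i ∈ Finset.range (m - j), h i j
      = ∑ i ∈ Finset.range m, ∑ j ∈ Finset.range (m - i), h i j := by
  have L : ∀ (H : Nat → Nat → Int),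
      ∑ j ∈ Finset.range m, ∑ i ∈ Finset.range (m - j), H i j
        = ∑ j ∈ Finset.range m, ∑ i ∈ Finset.range m, (if i + j < m then H i j else 0) := by
    intro H
    refine Finset.sum_congr rfl (fun j hj => ?_)
    rw [pv_sum_extend (fun i => H i j) (m - j) m (by omega)]
    exact Finset.sum_congr rfl (fun i _ => by
      have : i < m - j ↔ i + j < m := by
        have := Finset.mem_range.1 hj; omega
      simp [this])
  rw [L h]
  rw [Finset.sum_comm]
  rw [show ∀ (H : Nat → Nat → Int), ∑ i ∈ Finset.range m, ∑ j ∈ Finset.range (m - i), H i j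
        = ∑ i ∈ Finset.range m, ∑ j ∈ Finset.range m, (if j + i < m then H i j else 0) from
      fun H => L (fun a b => H b a)]
  refine Finset.sum_congr rfl (fun i _ => Finset.sum_congr rfl (fun j _ => by
    have : i + j < m ↔ j + i < m := by omega
    simp [this]))




theorem pv_inner_go (C : List Int) : ∀ (b a : Nat) (t c : Int), a + b ≤ C.length →
    List.foldl (fun (s : Int × Int) k =>
        let cur := if PySem.List.pyGetD C k 0 > s.2 then PySem.List.pyGetD C k 0 else s.2
        (if cur > -1 then s.1 + cur else s.1, cur))
      (t, c) (List.map (fun i : Nat => (i : Int)) (List.range' a b))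
    = (t + ((List.range b).map (fun i => pvPos (List.foldl max c (pvSub C a (i + 1))))).sum,
       List.foldl max c (pvSub C a b)) := by
  intro b
  induction b with
  | zero =>
    intro a t c _
    simp [pvSub]
  | succ b ih =>
    intro a t c hab
    have ha : a < C.length := by omega
    rw [List.range'_succ, List.map_cons, List.foldl_cons]
    have hget : PySem.List.pyGetD C ((a : Nat) : Int) 0 = C.getD a 0 := PySem.List.pyGetD_natCast C a 0
    have hsub1 : pvSub C a 1 = [C.getD a 0] := by
      rw [pv_sub_cons C a 0 ha]; simp [pvSub]
    have hconsS : ∀ i : Nat, pvSub C a (i + 1) = C.getD a 0 :: pvSub C (a + 1) i :=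
      fun i => pv_sub_cons C a i ha
    dsimp only
    rw [hget, pv_if_max]
    rw [ih (a + 1) _ (max c (C.getD a 0)) (by omega)]
    rw [Prod.mk.injEq]
    refine ⟨?_, ?_⟩
    · -- first components
      rw [List.range_succ_eq_map, List.map_cons, List.sum_cons, List.map_map]
      rw [hsub1]
      simp only [List.foldl_cons, List.foldl_nil]
      rw [show (if max c (C.getD a 0) > -1 then t + max c (C.getD a 0) else t)
            = t + pvPos (max c (C.getD a 0)) by unfold pvPos; split <;> simp]
      rw [add_assoc]
      congr 1
      apply congrArg
      apply congrArg List.sum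
      apply List.map_congr_left
      intro i _
      show pvPos (List.foldl max (max c (C.getD a 0)) (pvSub C (a + 1) (i + 1)))
        = pvPos (List.foldl max c (pvSub C a (Nat.succ i + 1)))
      rw [show Nat.succ i + 1 = (i + 1) + 1 from rfl, hconsS (i + 1)]
      rfl
    · -- second components
      show List.foldl max (max c (C.getD a 0)) (pvSub C (a + 1) b)
        = List.foldl max c (pvSub C a (b + 1))
      rw [hconsS b]
      rfl

theorem pv_foldl_congr {α β : Type} (l : List α) (f g : β → α → β) (b : β)
    (h : ∀ x ∈ l, ∀ acc, f acc x = g acc x) : l.foldl f b = l.foldl g b := by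
  induction l generalizing b with
  | nil => rfl
  | cons x s ih =>
    simp only [List.foldl_cons]
    rw [h x (by simp)]
    exact ih _ (fun y hy acc => h y (by simp [hy]) acc)

theorem pv_altStage2 (C : List Int) :
    altStage2 C = ∑ j ∈ Finset.range C.length,
      ∑ i ∈ Finset.range (C.length - j), pvPos (pvWMax C j (i + 1)) := by
  unfold altStage2
  rw [PySem.List.pyRange_zero_natCast, List.foldl_map]
  rw [pv_foldl_add _ (fun j => ((List.range (C.length - j)).map
        (fun i => pvPos (pvWMax C j (i + 1)))).sum) (List.range C.length) 0 ?_]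
  · rw [zero_add, pv_list_sum_range]
    exact Finset.sum_congr rfl (fun j _ => pv_list_sum_range _ _)
  · intro j hj t
    have hjm : j < C.length := List.mem_range.1 hj
    have hr : PySem.List.pyRange (j : Int) (C.length : Int) 1
        = List.map (fun i : Nat => (i : Int)) (List.range' j (C.length - j)) := by
      rw [PySem.List.pyRange_one, List.range'_eq_map_range, List.map_map]
      have : ((C.length : Int) - (j : Int)).toNat = C.length - j := by omega
      rw [this]
      apply List.map_congr_left
      intro k _
      show (j : Int) + (k : Int) = ((j + k : Nat) : Int)
      push_cast; ring
    rw [hr, pv_inner_go C (C.length - j) j t (-1) (by omega)]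
    show t + _ = t + _
    congr 1
    apply congrArg List.sum
    apply List.map_congr_left
    intro i _
    exact pv_pos_foldl _

theorem pv_pyS (X : List Int) :
    pyS X = ((List.range X.length).map
      (fun i => (pvRows X i).filter (fun m => decide (m > -1)))).flatten := by
  unfold pyS
  rw [PySem.List.pyRange_zero_natCast, List.foldl_map]
  rw [pv_foldl_chunks _ (fun i => (pvRows X i).filter (fun m => decide (m > -1)))
      (List.range X.length) [] ?_]
  · rfl
  · intro i hi B
    have him : i < X.length := List.mem_range.1 hi
    have hcast : (X.length : Int) - (i : Int) = ((X.length - i : Nat) : Int) := by omega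
    rw [hcast, PySem.List.pyRange_zero_natCast, List.foldl_map]
    rw [pv_foldl_congr (List.range (X.length - i)) _
        (fun B j => if pvWMax X j (i + 1) > -1 then B ++ [pvWMax X j (i + 1)] else B) B ?_]
    · rw [PySem.List.foldl_append_ite (fun j => pvWMax X j (i + 1) > -1) (fun j => pvWMax X j (i + 1))]
      unfold pvRows
      dsimp only
      rw [List.filter_map]
      rfl
    · intro j _ B'
      dsimp only
      rw [show (i : Int) + (j : Int) + 1 = (j : Int) + ((i + 1 : Nat) : Int) by push_cast; ring,
        PySem.List.slice_natCast_add]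
      rfl

theorem pv_pyS_sum (C : List Int) :
    (pyS C).sum = ∑ i ∈ Finset.range C.length,
      ∑ j ∈ Finset.range (C.length - i), pvPos (pvWMax C j (i + 1)) := by
  rw [pv_pyS, List.sum_flatten, List.map_map]
  rw [pv_list_sum_range]
  refine Finset.sum_congr rfl (fun i _ => ?_)
  show ((pvRows C i).filter (fun m => decide (m > -1))).sum = _
  rw [pv_sum_filter]
  unfold pvRows
  rw [List.map_map]
  exact pv_list_sum_range _ _

theorem key_stage2 (C : List Int) : altStage2 C = (pyS C).sum := by
  rw [pv_altStage2, pv_pyS_sum, pv_triangle]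

theorem pv_stage1_go (X : List Int) : ∀ (b a : Nat) (acc : List Int), a + b = X.length →
    List.foldl (fun (s : List Int × List Int) i =>
        let B2 := s.1.foldl (fun B m => if m > -1 then B ++ [m] else B) s.2
        let row2 := (PySem.List.pyRange 0 ((X.length : Int) - i - 1) 1).map
          (fun j => max (PySem.List.pyGetD s.1 j 0) (PySem.List.pyGetD X (j + i + 1) 0))
        (row2, B2))
      (pvRows X a, acc) (List.map (fun i : Nat => (i : Int)) (List.range' a b))
    = (pvRows X (a + b), acc ++ ((List.range' a b).map
        (fun i => (pvRows X i).filter (fun m => decide (m > -1)))).flatten) := by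
  intro b
  induction b with
  | zero => intro a acc _; simp
  | succ b ih =>
    intro a acc hab
    rw [List.range'_succ, List.map_cons, List.foldl_cons]
    dsimp only
    have hB2 : (pvRows X a).foldl (fun B m => if m > -1 then B ++ [m] else B) acc
        = acc ++ (pvRows X a).filter (fun m => decide (m > -1)) :=
      PySem.List.foldl_append_ite_eq_filter (fun m => m > -1) _ acc
    have hrow2 : (PySem.List.pyRange 0 ((X.length : Int) - (a : Int) - 1) 1).map
        (fun j => max (PySem.List.pyGetD (pvRows X a) j 0) (PySem.List.pyGetD X (j + (a : Int) + 1) 0))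
        = pvRows X (a + 1) := by
      have hcast : (X.length : Int) - (a : Int) - 1 = ((X.length - a - 1 : Nat) : Int) := by omega
      rw [hcast, PySem.List.pyRange_zero_natCast, List.map_map]
      show _ = (List.range (X.length - (a + 1))).map (fun j => pvWMax X j (a + 1 + 1))
      rw [show X.length - (a + 1) = X.length - a - 1 by omega]
      apply List.map_congr_left
      intro j hj
      have hjlt : j < X.length - a - 1 := List.mem_range.1 hj
      show max (PySem.List.pyGetD (pvRows X a) ((j : Nat) : Int) 0)
          (PySem.List.pyGetD X (((j : Nat) : Int) + (a : Int) + 1) 0) = _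
      rw [PySem.List.pyGetD_natCast]
      rw [show ((j : Nat) : Int) + (a : Int) + 1 = ((j + a + 1 : Nat) : Int) by push_cast; ring]
      rw [PySem.List.pyGetD_natCast]
      unfold pvRows
      rw [PySem.List.getD_map_range _ _ _ _ (by omega)]
      rw [show j + a + 1 = j + (a + 1) by omega]
      exact (pv_wmax_succ X j (a + 1) (by omega) (by omega)).symm
    rw [hB2, hrow2, ih (a + 1) _ (by omega)]
    rw [show a + 1 + b = a + (b + 1) by omega]
    rw [List.map_cons, List.flatten_cons, List.append_assoc]

theorem key_stage1 (X : List Int) : altStage1 X = pyS X := by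
  unfold altStage1
  rw [PySem.List.pyRange_zero_natCast, List.foldl_map]
  have h0 : (X, ([] : List Int)) = (pvRows X 0, ([] : List Int)) := by rw [pv_rows_zero]
  rw [h0]
  rw [show List.foldl _ (pvRows X 0, ([] : List Int)) (List.range X.length)
      = List.foldl (fun (s : List Int × List Int) i =>
          let B2 := s.1.foldl (fun B m => if m > -1 then B ++ [m] else B) s.2
          let row2 := (PySem.List.pyRange 0 ((X.length : Int) - i - 1) 1).map
            (fun j => max (PySem.List.pyGetD s.1 j 0) (PySem.List.pyGetD X (j + i + 1) 0))
          (row2, B2))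
        (pvRows X 0, ([] : List Int)) (List.map (fun i : Nat => (i : Int)) (List.range' 0 X.length)) from by
    rw [← List.range_eq_range', List.foldl_map]]
  rw [pv_stage1_go X X.length 0 [] (by omega)]
  rw [pv_pyS, ← List.range_eq_range']
  rfl

-- ===== VERDICT (by name: the statement is the Claim_ definition above) =====
theorem TransformTransform_spec : Claim_equal_TransformTransform := by
  intro A N _
  unfold Spec_TransformTransform TransformTransform TransformTransform_alt
  rw [key_stage1, key_stage2]
  by_cases h : PySem.Int.mod (pyS (pyS A)).sum 2 = 0
  · rw [if_pos h]
    exact (decide_eq_true h).symm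
  · rw [if_neg h]
    exact (decide_eq_false h).symm
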